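-- pv_equiv track=rewrite | github.com/Coding-Capybara/CodingTestWinner | programmers/135808/이민아.py | solution
-- ===== SOURCE A (Python) =====
-- def solution(k, m, score):
--     #1.
--     score.sort(reverse=False)
--     #2.
--     count = len(score)//m
--     box = list()
--     answer = 0
--     #3.
--     for i in range(count):
--         while len(box) < m: #box 안의 사과 개수가 m개가 될 때 까지만 반복
--             box.append(score.pop())
--         #3-1.
--         answer += min(box) * m
--         box = []
--
--     return answer
-- ===== SOURCE B (Python) =====
-- def solution(k, m, score):
--     # The minimum of each full box of the m current-highest apples is, in the
--     # ascending sort, the element at index n-m, n-2m, ...; those indices are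
--     # exactly n%m, n%m+m, ..., so sum them directly with a stride.
--     if m <= 0:
--         return 0
--     s = sorted(score)
--     n = len(s)
--     total = 0
--     for i in range(n % m, n, m):
--         total += s[i]
--     return m * total
-- ===== Notes on version B (the rewrite author's own statement) =====
-- stated objective: simpler
-- what changed: B replaces A's per-group simulation (popping the top m scores into a box, taking min(box) each round) by sorting once and summing the elements at the strided indices n%m, n%m+m, ..., which are exactly the group minima, with a single final multiplication by m.
import Mathlib
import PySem

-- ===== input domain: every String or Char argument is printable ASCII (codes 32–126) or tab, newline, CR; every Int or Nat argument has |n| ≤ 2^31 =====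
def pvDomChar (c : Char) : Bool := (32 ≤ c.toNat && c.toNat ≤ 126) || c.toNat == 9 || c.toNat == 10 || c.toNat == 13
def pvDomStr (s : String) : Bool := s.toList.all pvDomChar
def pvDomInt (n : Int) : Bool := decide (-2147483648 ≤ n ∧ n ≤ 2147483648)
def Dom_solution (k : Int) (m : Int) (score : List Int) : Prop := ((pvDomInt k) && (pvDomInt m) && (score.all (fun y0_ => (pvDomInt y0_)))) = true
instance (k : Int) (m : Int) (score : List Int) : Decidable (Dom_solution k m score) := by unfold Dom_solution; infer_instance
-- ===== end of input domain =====

-- B replaces A's pop-into-a-box simulation by a direct strided index sum over the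
-- ascending sort (objective: simpler). A mutates `score` in place (sorts and pops
-- from it); the equivalence proved here is about the RETURN value only.

-- ===== PORT A =====
-- 'while len(box) < m: box.append(score.pop())'
def fillBox (m : Int) (box : List Int) (score : List Int) : List Int × List Int :=
  if h : (box.length : Int) < m then
    match PySem.List.pop? score with
    | some (x, rest) => fillBox m (box ++ [x]) rest
    | none => (box, score)  -- Python raises IndexError here; never reached (enough elements exist)
  else (box, score)
termination_by (m - box.length).toNat
decreasing_by simp; omega

def solution (k : Int) (m : Int) (score : List Int) : Int :=
  let s := PySem.List.sorted score (fun x => x)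
  let count := PySem.Int.floordiv (s.length : Int) m
  ((PySem.List.pyRange 0 count 1).foldl
    (fun (st : List Int × Int) _ =>
      let p := fillBox m [] st.1
      -- 'answer += min(box) * m' (min of nonempty box; default never used)
      (p.2, st.2 + (PySem.List.min? p.1 (fun x => x)).getD 0 * m))
    (s, 0)).2

-- ===== PORT B =====
def solution_alt (k : Int) (m : Int) (score : List Int) : Int :=
  if m ≤ 0 then 0
  else
    let s := PySem.List.sorted score (fun x => x)
    let n : Int := s.length
    m * ((PySem.List.pyRange (PySem.Int.mod n m) n m).foldl
          (fun total i => total + PySem.List.pyGetD s i 0) 0)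

-- ===== PRECONDITION & SPEC =====
-- Pre_ excludes only m = 0, on which A raises ZeroDivisionError ('len(score)//m').
def Pre_solution (k : Int) (m : Int) (score : List Int) : Prop := m ≠ 0
instance (k : Int) (m : Int) (score : List Int) : Decidable (Pre_solution k m score) := by unfold Pre_solution; infer_instance
def pvWitness_solution : Int × Int × List Int := (1, 2, [1, 2, 3, 4])

def Spec_solution (k : Int) (m : Int) (score : List Int) (out : Int) : Prop := out = solution_alt k m score
instance (k : Int) (m : Int) (score : List Int) (out : Int) : Decidable (Spec_solution k m score out) := by unfold Spec_solution; infer_instance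

-- ===== CLAIM (what is proved, stated in full; the proofs are below) =====
def Claim_equal_solution : Prop := ∀ (k : Int) (m : Int) (score : List Int), Dom_solution k m score → Pre_solution k m score → Spec_solution k m score (solution k m score)

-- ===== LEMMAS AND PROOFS =====

-- Filling the box pops exactly the last m elements, in reverse order.
lemma fillBox_spec (m' : Nat) (u : List Int) : ∀ (box t : List Int),
    box.length + u.length = m' →
    fillBox (m' : Int) box (t ++ u) = (box ++ u.reverse, t) := by
  induction u using List.reverseRecOn with
  | nil =>
    intro box t h
    rw [fillBox]
    simp at h
    simp [h]
  | append_singleton u' x ih =>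
    intro box t h
    rw [fillBox]
    have hlt : (box.length : Int) < (m' : Int) := by
      simp at h; omega
    rw [dif_pos hlt, show t ++ (u' ++ [x]) = (t ++ u') ++ [x] by simp,
        PySem.List.pop?_last]
    have := ih (box ++ [x]) t (by simp at h ⊢; omega)
    simp only [this]
    simp

-- min(box) picks the minimal value.
lemma minD_eq (l : List Int) (v : Int) (hv : v ∈ l) (hmin : ∀ y ∈ l, v ≤ y) :
    (PySem.List.min? l (fun x => x)).getD 0 = v := by
  cases e : PySem.List.min? l (fun x => x) with
  | none =>
    rw [PySem.List.min?_eq_none_iff] at e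
    subst e; cases hv
  | some w =>
    have hw := PySem.List.min?_mem e
    have h1 := PySem.List.min?_isMin e v hv
    have h2 := hmin w hw
    simp
    omega

-- a 'for' loop whose body ignores the index is iteration of its body
lemma foldl_ignore_iterate {σ : Type} (g : σ → σ) : ∀ (l : List Int) (init : σ),
    l.foldl (fun st _ => g st) init = g^[l.length] init := by
  intro l
  induction l with
  | nil => intro init; rfl
  | cons x t ih =>
    intro init
    simp [List.foldl_cons, ih, Function.iterate_succ_apply]

-- range(r, r + c*step, step) written out
lemma pyRange_stride (r step : Int) (hs : 0 < step) (c : Nat) :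
    PySem.List.pyRange r (r + c * step) step
      = (List.range c).map (fun (j : Nat) => r + step * (j : Int)) := by
  rw [PySem.List.pyRange_of_pos _ _ hs]
  have hcount : (if r < r + (c : Int) * step
      then ((r + (c : Int) * step - r + step - 1) / step).toNat else 0) = c := by
    rcases Nat.eq_zero_or_pos c with hc | hc
    · subst hc; simp
    · have hlt : r < r + (c : Int) * step := by nlinarith [Int.natCast_pos.mpr hc]
      rw [if_pos hlt]
      have h2 : r + (c : Int) * step - r + step - 1 = (step - 1) + (c : Int) * step := by ring
      rw [h2, Int.add_mul_ediv_right _ _ (by omega : step ≠ 0),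
          Int.ediv_eq_zero_of_lt (by omega) (by omega)]
      simp
  rw [hcount]

lemma pyRange_self (x step : Int) (hs : 0 < step) : PySem.List.pyRange x x step = [] := by
  rw [PySem.List.pyRange_of_pos _ _ hs]; simp

-- The main loop invariant: iterating A's box step c = len/m' times over a sorted
-- list adds m' times the sum of the elements at indices len%m', len%m'+m', … .
lemma loopA_eq (m' : Nat) (hm : 0 < m') :
    ∀ (c : Nat) (s : List Int), s.Pairwise (· ≤ ·) → s.length / m' = c → ∀ (a : Int),
    ((fun (st : List Int × Int) =>
        ((fillBox (m' : Int) [] st.1).2,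
         st.2 + (PySem.List.min? (fillBox (m' : Int) [] st.1).1 (fun x => x)).getD 0 * (m' : Int)))^[c]
      (s, a)).2
      = a + (m' : Int) *
          ((PySem.List.pyRange ((s.length % m' : Nat) : Int) (s.length : Int) (m' : Int)).map
            (fun i => PySem.List.pyGetD s i 0)).sum := by
  intro c
  induction c with
  | zero =>
    intro s hs hc a
    have hlen : s.length < m' := Nat.lt_of_div_eq_zero hm hc
    rw [Nat.mod_eq_of_lt hlen,
        pyRange_self _ _ (show (0 : Int) < (m' : Int) by exact_mod_cast hm)]
    simp
  | succ c ih =>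
    intro s hs hc a
    set n := s.length with hn
    have hdm := Nat.div_add_mod n m'
    rw [hc] at hdm
    have hr : n % m' < m' := Nat.mod_lt _ hm
    have hexp : m' * (c + 1) = m' * c + m' := by ring
    set r := n % m' with hrdef
    set j := n - m' with hj
    have hjn : j = m' * c + r := by omega
    have hjlt : j < n := by omega
    -- decompose s into the untouched prefix t and the popped block u
    have hts : s.take j ++ s.drop j = s := List.take_append_drop j s
    set t := s.take j with ht
    set u := s.drop j with hu
    have hul : u.length = m' := by rw [hu, List.length_drop, ← hn]; omega
    have htl : t.length = j := by rw [ht, List.length_take, ← hn]; omega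
    -- the box step
    have hfill : fillBox (m' : Int) [] s = (u.reverse, t) := by
      conv_lhs => rw [← hts]
      rw [fillBox_spec m' u [] t (by simp [hul])]
      simp
    obtain ⟨v, u', huv⟩ := List.exists_cons_of_ne_nil
      (show u ≠ [] by intro hE; rw [hE] at hul; simp at hul; omega)
    have hup : u.Pairwise (· ≤ ·) := hs.sublist (List.drop_sublist j s)
    have hvy : ∀ y ∈ u.reverse, v ≤ y := by
      intro y hy
      rw [List.mem_reverse, huv, List.mem_cons] at hy
      rcases hy with rfl | h
      · exact le_refl _
      · rw [huv] at hup; exact (List.pairwise_cons.mp hup).1 y h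
    have hminv : (PySem.List.min? u.reverse (fun x => x)).getD 0 = v :=
      minD_eq _ v (by rw [List.mem_reverse, huv]; exact List.mem_cons_self ..) hvy
    -- v is s[j]
    have hjn' : j < s.length := hjlt
    have hd : s.drop j = v :: u' := by rw [← hu, huv]
    have hvj : s[j]'hjn' = v := by
      have h0 : (s.drop j)[0]'(by rw [hd]; simp) = v := by simp [hd]
      simpa using h0
    -- one application of the loop body
    have hstep :
        ((fun (st : List Int × Int) =>
            ((fillBox (m' : Int) [] st.1).2,
             st.2 + (PySem.List.min? (fillBox (m' : Int) [] st.1).1 (fun x => x)).getD 0 * (m' : Int)))^[c + 1]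
          (s, a))
        = ((fun (st : List Int × Int) =>
            ((fillBox (m' : Int) [] st.1).2,
             st.2 + (PySem.List.min? (fillBox (m' : Int) [] st.1).1 (fun x => x)).getD 0 * (m' : Int)))^[c]
          (t, a + v * (m' : Int))) := by
      rw [Function.iterate_succ_apply]
      congr 1
      simp only [hfill, hminv]
    rw [hstep]
    -- the inductive hypothesis on t
    have htp : t.Pairwise (· ≤ ·) := hs.sublist (List.take_sublist j s)
    have htc : t.length / m' = c := by
      rw [htl, hjn, Nat.mul_add_div hm, Nat.div_eq_of_lt hr]
      omega
    have htr : t.length % m' = r := by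
      rw [htl, hjn, Nat.mul_add_mod, Nat.mod_eq_of_lt hr]
    rw [ih t htp htc (a + v * (m' : Int)), htr, htl]
    -- rewrite both ranges in stride form
    have hsInt : (0 : Int) < (m' : Int) := by exact_mod_cast hm
    have hnInt : ((n : Nat) : Int) = (r : Int) + ((c + 1 : Nat) : Int) * (m' : Int) := by
      rw [← hdm]; push_cast; ring
    have hjInt : ((j : Nat) : Int) = (r : Int) + ((c : Nat) : Int) * (m' : Int) := by
      rw [hjn]; push_cast; ring
    rw [hnInt, hjInt, pyRange_stride _ _ hsInt, pyRange_stride _ _ hsInt]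
    rw [List.range_succ, List.map_append, List.map_append, List.sum_append]
    -- prefix elements agree between s and t
    have hpref : ∀ i ∈ (List.range c).map (fun (j : Nat) => (r : Int) + (m' : Int) * (j : Int)),
        PySem.List.pyGetD t i 0 = PySem.List.pyGetD s i 0 := by
      intro i hi
      obtain ⟨jj, hjj, rfl⟩ := List.mem_map.mp hi
      rw [List.mem_range] at hjj
      have hlt' : r + m' * jj < j := by
        have : m' * jj + m' ≤ m' * c := by
          calc m' * jj + m' = m' * (jj + 1) := by ring
          _ ≤ m' * c := Nat.mul_le_mul_left _ (by omega)
        omega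
      have hix : (r : Int) + (m' : Int) * (jj : Int) = ((r + m' * jj : Nat) : Int) := by
        push_cast; ring
      rw [hix,
          PySem.List.pyGetD_eq_getElem t 0 (by positivity)
            (by rw [htl]; exact_mod_cast hlt'),
          PySem.List.pyGetD_eq_getElem s 0 (by positivity)
            (by rw [← hn]; exact_mod_cast (show r + m' * jj < n by omega))]
      simp only [Int.toNat_natCast, ht]
      exact List.getElem_take
    rw [List.map_congr_left hpref]
    -- the appended element is s[j] = v
    have hlast : PySem.List.pyGetD s ((r : Int) + (m' : Int) * (c : Int)) 0 = v := by
      have hix : (r : Int) + (m' : Int) * (c : Int) = ((j : Nat) : Int) := by push_cast; omega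
      rw [hix, PySem.List.pyGetD_eq_getElem s 0 (by positivity) (by rw [← hn]; exact_mod_cast hjn')]
      simpa using hvj
    simp only [List.map_cons, List.map_nil, List.sum_cons, List.sum_nil, hlast]
    ring

-- for m < 0, count = len//m ≤ 0
lemma count_nonpos_of_neg (n m : Int) (hn : 0 ≤ n) (hm : m < 0) :
    PySem.Int.floordiv n m ≤ 0 := by
  have h1 := PySem.Int.floordiv_mul_add_mod n m
  have h2 := PySem.Int.mod_neg_bounds n hm
  by_contra h
  push_neg at h
  nlinarith [mul_le_mul_of_nonpos_right (by omega : (1 : Int) ≤ PySem.Int.floordiv n m) (by omega : m ≤ 0)]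

-- ===== VERDICT (by name: the statement is the Claim_ definition above) =====
theorem solution_spec : Claim_equal_solution := by
  intro k m score _ hpre
  unfold Spec_solution solution solution_alt
  rcases lt_or_gt_of_ne hpre with hm | hm
  · -- m < 0: count ≤ 0, the loop never runs, A returns 0; B's guard returns 0
    have hnil : PySem.List.pyRange 0
        (PySem.Int.floordiv ((score.length : Nat) : Int) m) 1 = [] :=
      PySem.List.pyRange_one_eq_nil (count_nonpos_of_neg _ m (by positivity) hm)
    rw [if_pos (by omega : m ≤ 0)]
    simp [hnil]
  · -- m > 0
    rw [if_neg (by omega : ¬ m ≤ 0)]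
    have hm0 : 0 < m.toNat := by omega
    have hmm : m = ((m.toNat : Nat) : Int) := by omega
    set m' := m.toNat with hm'def
    set s := PySem.List.sorted score (fun x => x) with hsdef
    rw [hmm]
    simp only [PySem.Int.floordiv_natCast, PySem.Int.mod_natCast]
    rw [foldl_ignore_iterate, PySem.List.length_pyRange_one]
    rw [show (((s.length / m' : Nat) : Int) - 0).toNat = s.length / m' from by
      rw [sub_zero, Int.toNat_natCast]]
    rw [loopA_eq m' hm0 (s.length / m') s (PySem.List.sorted_pairwise score (fun x => x)) rfl 0]
    rw [PySem.List.foldl_add _ (fun i => PySem.List.pyGetD s i 0) 0]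
    ring
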